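-- pv_equiv track=rewrite | github.com/wkbrowne/technical_dashboard | src/pipelines/checkpoint.py | get_stage_before
-- ===== SOURCE A (Python) =====
-- from typing import Dict, List, Optional, Tuple
--
-- CHECKPOINT_STAGES = [
--     ("01_single_stock", "Single-stock features"),
--     ("02_cross_sectional", "Cross-sectional features"),
--     ("03_spread_features", "Daily spread features"),
--     ("04_weekly_features", "Higher timeframe features"),
--     ("05_weekly_cs", "Weekly cross-sectional features"),
--     ("06_weekly_spread", "Weekly spread features"),
--     ("07_interpolated", "NaN interpolation"),
--     ("08_targets", "Target generation"),
--     ("09_final", "Final output"),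
-- ]
--
-- STAGE_ORDER = {name: idx for idx, (name, _) in enumerate(CHECKPOINT_STAGES)}
--
-- def get_stage_before(stage: str) -> Optional[str]:
--     """Get the checkpoint stage immediately before the given stage."""
--     idx = STAGE_ORDER.get(stage, -1)
--     if idx <= 0:
--         return None
--
--     for name, _ in CHECKPOINT_STAGES:
--         if STAGE_ORDER[name] == idx - 1:
--             return name
--     return None
-- ===== SOURCE B (Python) =====
-- from typing import Dict, List, Optional, Tuple
--
-- CHECKPOINT_STAGES = [
--     ("01_single_stock", "Single-stock features"),
--     ("02_cross_sectional", "Cross-sectional features"),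
--     ("03_spread_features", "Daily spread features"),
--     ("04_weekly_features", "Higher timeframe features"),
--     ("05_weekly_cs", "Weekly cross-sectional features"),
--     ("06_weekly_spread", "Weekly spread features"),
--     ("07_interpolated", "NaN interpolation"),
--     ("08_targets", "Target generation"),
--     ("09_final", "Final output"),
-- ]
--
-- _NAMES = [name for name, _ in CHECKPOINT_STAGES]
-- _PREV = dict(zip(_NAMES[1:], _NAMES))
--
-- def get_stage_before(stage: str) -> Optional[str]:
--     """Get the checkpoint stage immediately before the given stage."""
--     return _PREV.get(stage)
-- ===== Notes on version B (the rewrite author's own statement) =====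
-- stated objective: simpler
-- what changed: Replaces the index lookup plus linear scan for the stage with order idx-1 by a precomputed predecessor map (zip of consecutive stage names), so the function body is a single dict lookup with no indices and no loop.
import Mathlib
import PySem

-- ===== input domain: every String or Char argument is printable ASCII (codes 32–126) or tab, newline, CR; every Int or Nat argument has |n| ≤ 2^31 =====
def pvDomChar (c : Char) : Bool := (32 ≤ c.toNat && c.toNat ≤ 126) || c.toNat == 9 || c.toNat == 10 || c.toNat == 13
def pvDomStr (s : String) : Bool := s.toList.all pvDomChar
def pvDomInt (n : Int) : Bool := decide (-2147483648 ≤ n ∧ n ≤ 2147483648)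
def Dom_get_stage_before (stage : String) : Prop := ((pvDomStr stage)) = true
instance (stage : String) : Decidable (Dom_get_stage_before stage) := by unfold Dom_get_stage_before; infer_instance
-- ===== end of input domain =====

-- B replaces A's index lookup + linear scan by a precomputed predecessor map; objective: simpler.

-- ===== PORT A =====
def checkpointStages : List (String × String) := [
  ("01_single_stock", "Single-stock features"),
  ("02_cross_sectional", "Cross-sectional features"),
  ("03_spread_features", "Daily spread features"),
  ("04_weekly_features", "Higher timeframe features"),
  ("05_weekly_cs", "Weekly cross-sectional features"),
  ("06_weekly_spread", "Weekly spread features"),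
  ("07_interpolated", "NaN interpolation"),
  ("08_targets", "Target generation"),
  ("09_final", "Final output")]

-- STAGE_ORDER = {name: idx for idx, (name, _) in enumerate(CHECKPOINT_STAGES)}
def stageOrder : PySem.Dict String Int :=
  (PySem.List.enumerate checkpointStages).foldl
    (fun d p => d.insert p.2.1 p.1) PySem.Dict.empty

-- the for-loop of A; STAGE_ORDER[name] cannot raise (every name is a key), ported as get? with
-- a match that is exact because the key is always present
def getStageBeforeLoop (idx : Int) : List (String × String) → Option String
  | [] => none
  | (name, _) :: rest =>
    match stageOrder.get? name with
    | some o => if o == idx - 1 then some name else getStageBeforeLoop idx rest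
    | none => getStageBeforeLoop idx rest   -- unreachable: name is always a key of stageOrder

def get_stage_before (stage : String) : Option String :=
  let idx := stageOrder.getD stage (-1)
  if idx ≤ 0 then none
  else getStageBeforeLoop idx checkpointStages

-- ===== PORT B =====
-- _NAMES = [name for name, _ in CHECKPOINT_STAGES]
def stageNames : List String := checkpointStages.map Prod.fst

-- _PREV = dict(zip(_NAMES[1:], _NAMES))
def prevDict : PySem.Dict String String :=
  PySem.Dict.ofList (List.zip (stageNames.drop 1) stageNames)

def get_stage_before_alt (stage : String) : Option String :=
  prevDict.get? stage

-- ===== PRECONDITION & SPEC =====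
def Spec_get_stage_before (stage : String) (out : Option String) : Prop := out = get_stage_before_alt stage
instance (stage : String) (out : Option String) : Decidable (Spec_get_stage_before stage out) := by unfold Spec_get_stage_before; infer_instance

-- ===== CLAIM (what is proved, stated in full; the proofs are below) =====
def Claim_equal_get_stage_before : Prop := ∀ (stage : String), Dom_get_stage_before stage → Spec_get_stage_before stage (get_stage_before stage)

-- ===== LEMMAS AND PROOFS =====
theorem get_stage_before_eq (stage : String) :
    get_stage_before stage = get_stage_before_alt stage := by
  by_cases h1 : stage = "01_single_stock"; · subst h1; decide
  by_cases h2 : stage = "02_cross_sectional"; · subst h2; decide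
  by_cases h3 : stage = "03_spread_features"; · subst h3; decide
  by_cases h4 : stage = "04_weekly_features"; · subst h4; decide
  by_cases h5 : stage = "05_weekly_cs"; · subst h5; decide
  by_cases h6 : stage = "06_weekly_spread"; · subst h6; decide
  by_cases h7 : stage = "07_interpolated"; · subst h7; decide
  by_cases h8 : stage = "08_targets"; · subst h8; decide
  by_cases h9 : stage = "09_final"; · subst h9; decide
  -- stage is none of the nine names: both lookups miss
  have hs : stageOrder = PySem.Dict.mk [("01_single_stock", 0), ("02_cross_sectional", 1),
      ("03_spread_features", 2), ("04_weekly_features", 3), ("05_weekly_cs", 4),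
      ("06_weekly_spread", 5), ("07_interpolated", 6), ("08_targets", 7), ("09_final", 8)] := by
    decide
  have hp : prevDict = PySem.Dict.mk [("02_cross_sectional", "01_single_stock"),
      ("03_spread_features", "02_cross_sectional"), ("04_weekly_features", "03_spread_features"),
      ("05_weekly_cs", "04_weekly_features"), ("06_weekly_spread", "05_weekly_cs"),
      ("07_interpolated", "06_weekly_spread"), ("08_targets", "07_interpolated"),
      ("09_final", "08_targets")] := by
    decide
  simp [get_stage_before, get_stage_before_alt, hs, hp,
    PySem.Dict.getD, PySem.Dict.get?_mk_cons, PySem.Dict.get?,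
    Ne.symm h1, Ne.symm h2, Ne.symm h3, Ne.symm h4,
    Ne.symm h5, Ne.symm h6, Ne.symm h7, Ne.symm h8, Ne.symm h9]

-- ===== VERDICT (by name: the statement is the Claim_ definition above) =====
theorem get_stage_before_spec : Claim_equal_get_stage_before := by
  intro stage _
  exact get_stage_before_eq stage
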